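-- pv_equiv track=rewrite | github.com/cadegallen-prog/CC | scripts/comprehensive_validation_framework.py | is_equivalent_type
-- ===== SOURCE A (Python) =====
-- def is_equivalent_type(type1: str, type2: str) -> bool:
--     """Check if two product types are equivalent"""
--     equivalents = {
--         ('led_light_bulb', 'light_bulb'),
--         ('gfci_usb_outlet', 'usb_outlet', 'electrical_outlet'),
--         ('smart_flush_mount_light', 'flush_mount_light'),
--         ('landscape_flood_light', 'flood_light', 'landscape_lighting'),
--         ('smart_deadbolt_lock', 'door_lock'),
--         ('circuit_breaker_kit', 'circuit_breaker'),
--         ('led_track_lighting_kit', 'track_lighting'),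
--         ('mini_pendant_light', 'pendant_light'),
--         ('electrical_load_center', 'load_center'),
--         ('hvac_air_filter', 'air_filter'),
--         ('bathroom_exhaust_fan', 'exhaust_fan'),
--         ('dual_flush_toilet', 'toilet'),
--         ('kitchen_sink_with_faucet', 'sink'),
--         ('chainsaw_tuneup_kit', 'tool_kit'),
--         ('hex_driver_bits', 'drill_bit'),
--         ('sds_plus_rebar_cutter', 'specialty_cutter'),
--         ('hvlp_paint_sprayer', 'paint_sprayer'),
--         ('velcro_fastener_tape', 'tape'),
--         ('safety_respirator_cartridge', 'safety_respirator'),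
--         ('recessed_light_fixture', 'recessed_light'),
--         ('led_troffer_light', 'troffer_light'),
--         ('double_hung_window', 'window'),
--         ('multi_position_ladder', 'ladder'),
--         ('double_curtain_rod', 'curtain_rod'),
--         ('outdoor_roller_shade', 'window_shade'),
--         ('faucet_valve_stem', 'faucet_part'),
--         ('backflow_preventer_valve', 'plumbing_fitting'),
--         ('speaker_wall_mounts', 'speaker_mount'),
--         ('decorative_shelf_bracket', 'shelf_bracket'),
--         ('surge_protector_with_usb', 'surge_protector'),
--     }
--
--     for equiv_set in equivalents:
--         if type1 in equiv_set and type2 in equiv_set: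
--             return True
--
--     return False
-- ===== SOURCE B (Python) =====
-- # Each equivalence group is one space-separated string; an index
-- # (type string -> group number) is built from them once at import time.
-- _GROUPS = [
--     "led_light_bulb light_bulb",
--     "gfci_usb_outlet usb_outlet electrical_outlet",
--     "smart_flush_mount_light flush_mount_light",
--     "landscape_flood_light flood_light landscape_lighting",
--     "smart_deadbolt_lock door_lock",
--     "circuit_breaker_kit circuit_breaker",
--     "led_track_lighting_kit track_lighting",
--     "mini_pendant_light pendant_light",
--     "electrical_load_center load_center",
--     "hvac_air_filter air_filter",
--     "bathroom_exhaust_fan exhaust_fan",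
--     "dual_flush_toilet toilet",
--     "kitchen_sink_with_faucet sink",
--     "chainsaw_tuneup_kit tool_kit",
--     "hex_driver_bits drill_bit",
--     "sds_plus_rebar_cutter specialty_cutter",
--     "hvlp_paint_sprayer paint_sprayer",
--     "velcro_fastener_tape tape",
--     "safety_respirator_cartridge safety_respirator",
--     "recessed_light_fixture recessed_light",
--     "led_troffer_light troffer_light",
--     "double_hung_window window",
--     "multi_position_ladder ladder",
--     "double_curtain_rod curtain_rod",
--     "outdoor_roller_shade window_shade",
--     "faucet_valve_stem faucet_part",
--     "backflow_preventer_valve plumbing_fitting",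
--     "speaker_wall_mounts speaker_mount",
--     "decorative_shelf_bracket shelf_bracket",
--     "surge_protector_with_usb surge_protector",
-- ]
--
-- _INDEX = {}
-- for _i, _grp in enumerate(_GROUPS):
--     for _t in _grp.split():
--         _INDEX[_t] = _i
--
-- def is_equivalent_type(type1: str, type2: str) -> bool:
--     """Check if two product types are equivalent"""
--     g1 = _INDEX.get(type1)
--     return g1 is not None and g1 == _INDEX.get(type2)
-- ===== Notes on version B (the rewrite author's own statement) =====
-- stated objective: faster
-- what changed: Replaces the per-call scan over all 30 equivalence groups (two membership tests each) with a compact separator-encoded table that is split once at import time into a dict mapping each type string to its group index, so each call is two O(1) lookups and a comparison.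
import Mathlib
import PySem

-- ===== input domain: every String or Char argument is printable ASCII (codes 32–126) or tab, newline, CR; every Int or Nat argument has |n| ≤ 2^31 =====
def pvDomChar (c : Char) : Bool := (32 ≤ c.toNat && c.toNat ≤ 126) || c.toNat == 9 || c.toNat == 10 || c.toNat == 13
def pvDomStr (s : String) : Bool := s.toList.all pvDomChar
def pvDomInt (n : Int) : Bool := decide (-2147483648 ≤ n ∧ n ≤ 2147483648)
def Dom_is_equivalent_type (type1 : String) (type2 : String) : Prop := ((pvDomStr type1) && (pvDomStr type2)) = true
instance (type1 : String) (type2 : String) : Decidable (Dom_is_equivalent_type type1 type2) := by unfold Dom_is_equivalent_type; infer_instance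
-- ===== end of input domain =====

-- B stores each group as one space-separated string, split once at import into a type-to-group-index dict, so each call is two lookups instead of A's scan over the 30 groups.

-- ===== PORT A =====
-- A's 'equivalents' is a Python set of tuples of varying arity; iteration order of the set does not
-- affect the result (the loop only tests membership), ported as a list of lists in source order.
def aGroups : List (List String) :=
  [ ["led_light_bulb", "light_bulb"],
    ["gfci_usb_outlet", "usb_outlet", "electrical_outlet"],
    ["smart_flush_mount_light", "flush_mount_light"],
    ["landscape_flood_light", "flood_light", "landscape_lighting"],
    ["smart_deadbolt_lock", "door_lock"],
    ["circuit_breaker_kit", "circuit_breaker"],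
    ["led_track_lighting_kit", "track_lighting"],
    ["mini_pendant_light", "pendant_light"],
    ["electrical_load_center", "load_center"],
    ["hvac_air_filter", "air_filter"],
    ["bathroom_exhaust_fan", "exhaust_fan"],
    ["dual_flush_toilet", "toilet"],
    ["kitchen_sink_with_faucet", "sink"],
    ["chainsaw_tuneup_kit", "tool_kit"],
    ["hex_driver_bits", "drill_bit"],
    ["sds_plus_rebar_cutter", "specialty_cutter"],
    ["hvlp_paint_sprayer", "paint_sprayer"],
    ["velcro_fastener_tape", "tape"],
    ["safety_respirator_cartridge", "safety_respirator"],
    ["recessed_light_fixture", "recessed_light"],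
    ["led_troffer_light", "troffer_light"],
    ["double_hung_window", "window"],
    ["multi_position_ladder", "ladder"],
    ["double_curtain_rod", "curtain_rod"],
    ["outdoor_roller_shade", "window_shade"],
    ["faucet_valve_stem", "faucet_part"],
    ["backflow_preventer_valve", "plumbing_fitting"],
    ["speaker_wall_mounts", "speaker_mount"],
    ["decorative_shelf_bracket", "shelf_bracket"],
    ["surge_protector_with_usb", "surge_protector"] ]

-- 'for equiv_set in equivalents: if type1 in equiv_set and type2 in equiv_set: return True / return False'
def is_equivalent_type (type1 : String) (type2 : String) : Bool :=
  aGroups.any (fun g => g.contains type1 && g.contains type2)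

-- ===== PORT B =====
-- '_GROUPS = ["…", …]' — one space-separated string per group
def bGroups : List String :=
  [
    "led_light_bulb light_bulb",
    "gfci_usb_outlet usb_outlet electrical_outlet",
    "smart_flush_mount_light flush_mount_light",
    "landscape_flood_light flood_light landscape_lighting",
    "smart_deadbolt_lock door_lock",
    "circuit_breaker_kit circuit_breaker",
    "led_track_lighting_kit track_lighting",
    "mini_pendant_light pendant_light",
    "electrical_load_center load_center",
    "hvac_air_filter air_filter",
    "bathroom_exhaust_fan exhaust_fan",
    "dual_flush_toilet toilet",
    "kitchen_sink_with_faucet sink",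
    "chainsaw_tuneup_kit tool_kit",
    "hex_driver_bits drill_bit",
    "sds_plus_rebar_cutter specialty_cutter",
    "hvlp_paint_sprayer paint_sprayer",
    "velcro_fastener_tape tape",
    "safety_respirator_cartridge safety_respirator",
    "recessed_light_fixture recessed_light",
    "led_troffer_light troffer_light",
    "double_hung_window window",
    "multi_position_ladder ladder",
    "double_curtain_rod curtain_rod",
    "outdoor_roller_shade window_shade",
    "faucet_valve_stem faucet_part",
    "backflow_preventer_valve plumbing_fitting",
    "speaker_wall_mounts speaker_mount",
    "decorative_shelf_bracket shelf_bracket",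
    "surge_protector_with_usb surge_protector" ]

-- 'for _i, _grp in enumerate(_GROUPS): for _t in _grp.split(): _INDEX[_t] = _i'
def bIndex : PySem.Dict String Int :=
  (PySem.List.enumerate bGroups 0).foldl
    (fun d p => (PySem.Str.split₀ p.2).foldl (fun d t => d.insert t p.1) d) PySem.Dict.empty

-- 'g1 = _INDEX.get(type1); return g1 is not None and g1 == _INDEX.get(type2)'
def is_equivalent_type_alt (type1 : String) (type2 : String) : Bool :=
  let g1 := bIndex.get? type1
  g1.isSome && g1 == bIndex.get? type2

-- ===== PRECONDITION & SPEC =====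
def Spec_is_equivalent_type (type1 : String) (type2 : String) (out : Bool) : Prop := out = is_equivalent_type_alt type1 type2
instance (type1 : String) (type2 : String) (out : Bool) : Decidable (Spec_is_equivalent_type type1 type2 out) := by unfold Spec_is_equivalent_type; infer_instance

-- ===== CLAIM =====
def Claim_equal_is_equivalent_type : Prop := ∀ (type1 : String) (type2 : String), Dom_is_equivalent_type type1 type2 → Spec_is_equivalent_type type1 type2 (is_equivalent_type type1 type2)

-- ===== LEMMAS AND PROOFS =====

-- B's per-group split yields exactly A's group list (evaluated once by the kernel)
set_option maxRecDepth 4000 in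
theorem bSplit_eq_aGroups :
    bGroups.map PySem.Str.split₀ = aGroups := by decide

-- B's nested build loop, rewritten to run over the pre-split group lists
theorem foldl_enum_split (l : List String) (s : Int) (d : PySem.Dict String Int) :
    (PySem.List.enumerate l s).foldl
        (fun d p => (PySem.Str.split₀ p.2).foldl (fun d t => d.insert t p.1) d) d
      = (PySem.List.enumerate (l.map PySem.Str.split₀) s).foldl
        (fun d p => p.2.foldl (fun d t => d.insert t p.1) d) d := by
  induction l generalizing s d with
  | nil => simp [PySem.List.enumerate_nil]
  | cons a l ih => simp [PySem.List.enumerate_cons, ih]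

-- one group's inner insert loop: every member maps to i, everything else untouched
theorem get?_insertGroup (g : List String) (i : Int) (d : PySem.Dict String Int) (t : String) :
    (g.foldl (fun d s => d.insert s i) d).get? t
      = if g.contains t then some i else d.get? t := by
  induction g generalizing d with
  | nil => simp
  | cons a g ih =>
    simp only [List.foldl_cons, ih, List.contains_cons]
    by_cases h : t = a
    · subst h
      by_cases hg : g.contains t <;> simp_all
    · simp [PySem.Dict.get?_insert, h]

-- the whole build loop: lookup = index of the first group containing t, offset by the start index
theorem get?_build (G : List (List String)) (s : Int) (d : PySem.Dict String Int) (t : String)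
    (hfresh : ∀ x ∈ G.flatten, d.get? x = none) (hnd : G.flatten.Nodup) :
    ((PySem.List.enumerate G s).foldl
        (fun d p => p.2.foldl (fun d t => d.insert t p.1) d) d).get? t
      = match G.findIdx? (fun g => g.contains t) with
        | some k => some (s + k)
        | none => d.get? t := by
  induction G generalizing s d with
  | nil => simp [PySem.List.enumerate_nil]
  | cons g G ih =>
    rw [PySem.List.enumerate_cons]
    simp only [List.foldl_cons, List.findIdx?_cons]
    have hflat : (g :: G).flatten = g ++ G.flatten := by simp
    rw [hflat] at hfresh hnd
    have hndG : G.flatten.Nodup := hnd.of_append_right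
    have hdisj : ∀ x ∈ G.flatten, x ∉ g := fun x hx hxg =>
      (List.disjoint_of_nodup_append hnd) hxg hx
    have hfresh2 : ∀ x ∈ G.flatten, (g.foldl (fun d u => d.insert u s) d).get? x = none := by
      intro x hx
      simp [get?_insertGroup, hdisj x hx, hfresh x (List.mem_append_right _ hx)]
    rw [ih (s + 1) _ hfresh2 hndG]
    by_cases hc : g.contains t
    · have htg : t ∈ g := by simpa [List.contains_eq_mem] using hc
      have hfi : G.findIdx? (fun g => g.contains t) = none := by
        rw [List.findIdx?_eq_none_iff]
        intro x hxG
        simp only [List.contains_eq_mem, decide_eq_false_iff_not]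
        intro htx
        exact hdisj t (List.mem_flatten.mpr ⟨x, hxG, htx⟩) htg
      simp only [List.contains_eq_mem] at hfi
      simp [hfi, get?_insertGroup, htg]
    · have htg : t ∉ g := by simpa [List.contains_eq_mem] using hc
      cases hfi : G.findIdx? (fun g => g.contains t) with
      | none => simp [get?_insertGroup, htg]
      | some k =>
        have hcast : s + 1 + (k : Int) = s + ((k + 1 : Nat) : Int) := by push_cast; ring
        simp [htg, hcast]

theorem aGroups_flatten_nodup : aGroups.flatten.Nodup := by decide

theorem get?_bIndex (t : String) :
    bIndex.get? t = (aGroups.findIdx? (fun g => g.contains t)).map (fun k => (k : Int)) := by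
  unfold bIndex
  rw [foldl_enum_split, bSplit_eq_aGroups,
      get?_build aGroups 0 PySem.Dict.empty t (by intro x _; simp) aGroups_flatten_nodup]
  cases aGroups.findIdx? (fun g => g.contains t) <;> simp

-- with the flattened word list duplicate-free, a word lies in at most one group
theorem group_uniq {j1 j2 : Nat} (h1 : j1 < aGroups.length) (h2 : j2 < aGroups.length)
    (t : String) (ht1 : t ∈ aGroups[j1]) (ht2 : t ∈ aGroups[j2]) : j1 = j2 := by
  have hpw := (List.nodup_flatten.mp aGroups_flatten_nodup).2
  rw [List.pairwise_iff_getElem] at hpw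
  rcases lt_trichotomy j1 j2 with h | h | h
  · exact absurd ht2 (hpw j1 j2 h1 h2 h ht1)
  · exact h
  · exact absurd ht1 (hpw j2 j1 h2 h1 h ht2)

theorem findIdx_group {k : Nat} (hk : k < aGroups.length) (t : String) (ht : t ∈ aGroups[k]) :
    aGroups.findIdx? (fun g => g.contains t) = some k := by
  cases hfi : aGroups.findIdx? (fun g => g.contains t) with
  | none =>
    rw [List.findIdx?_eq_none_iff] at hfi
    have := hfi aGroups[k] (List.getElem_mem hk)
    simp only [List.contains_eq_mem, decide_eq_false_iff_not] at this
    exact absurd ht this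
  | some j =>
    obtain ⟨hj, hpj, -⟩ := List.findIdx?_eq_some_iff_getElem.mp hfi
    simp only [List.contains_eq_mem, decide_eq_true_eq] at hpj
    rw [group_uniq hj hk t hpj ht]

theorem is_equivalent_type_spec : Claim_equal_is_equivalent_type := by
  intro t1 t2 _
  unfold Spec_is_equivalent_type
  rw [Bool.eq_iff_iff]
  have h1 := get?_bIndex t1
  have h2 := get?_bIndex t2
  constructor
  · intro hA
    simp only [is_equivalent_type, List.any_eq_true, Bool.and_eq_true] at hA
    obtain ⟨g, hg, hc1, hc2⟩ := hA
    obtain ⟨k, hk, hgk⟩ := List.mem_iff_getElem.mp hg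
    subst hgk
    simp only [List.contains_eq_mem, decide_eq_true_eq] at hc1 hc2
    rw [findIdx_group hk t1 hc1] at h1
    rw [findIdx_group hk t2 hc2] at h2
    simp [is_equivalent_type_alt, h1, h2]
  · intro hB
    simp only [is_equivalent_type_alt, h1, h2, Bool.and_eq_true, beq_iff_eq] at hB
    obtain ⟨hs, heq⟩ := hB
    cases hfi1 : aGroups.findIdx? (fun g => g.contains t1) with
    | none => rw [hfi1] at hs; simp at hs
    | some k1 =>
      cases hfi2 : aGroups.findIdx? (fun g => g.contains t2) with
      | none => rw [hfi1, hfi2] at heq; simp at heq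
      | some k2 =>
        rw [hfi1, hfi2] at heq
        simp at heq
        obtain ⟨hk1, hp1, -⟩ := List.findIdx?_eq_some_iff_getElem.mp hfi1
        obtain ⟨hk2, hp2, -⟩ := List.findIdx?_eq_some_iff_getElem.mp hfi2
        subst heq
        simp only [is_equivalent_type, List.any_eq_true, Bool.and_eq_true]
        exact ⟨aGroups[k1], List.getElem_mem hk1, hp1, hp2⟩
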